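-- pv_equiv track=rewrite | github.com/reneethepooh/Food-Spin | food_spin/food_spin/routers.py | bucket_users_into_shards
-- ===== SOURCE A (Python) =====
-- NUM_LOGICAL_SHARDS = 16
--
-- def bucket_users_into_shards(user_ids):
--     d = {}
--     for id in user_ids:
--         shard = logical_shard_for_user(id)
--         if not shard in d:
--             d[shard] = []
--         d[shard].append(id)
--     return d
--
-- def logical_shard_for_user(user_id):
--     return user_id % NUM_LOGICAL_SHARDS
-- ===== SOURCE B (Python) =====
-- NUM_LOGICAL_SHARDS = 16
--
-- def logical_shard_for_user(user_id):
--     return user_id % NUM_LOGICAL_SHARDS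
--
-- def bucket_users_into_shards(user_ids):
--     shards = dict.fromkeys(logical_shard_for_user(i) for i in user_ids)
--     return {s: [i for i in user_ids if logical_shard_for_user(i) == s] for s in shards}
-- ===== Notes on version B (the rewrite author's own statement) =====
-- stated objective: alternative
-- what changed: Replaces A's one-pass dict build (insert-empty-then-append per element) with a two-phase shape: first compute the distinct shard keys in first-appearance order via dict.fromkeys, then build each bucket with one filtering comprehension per shard.
import Mathlib
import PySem

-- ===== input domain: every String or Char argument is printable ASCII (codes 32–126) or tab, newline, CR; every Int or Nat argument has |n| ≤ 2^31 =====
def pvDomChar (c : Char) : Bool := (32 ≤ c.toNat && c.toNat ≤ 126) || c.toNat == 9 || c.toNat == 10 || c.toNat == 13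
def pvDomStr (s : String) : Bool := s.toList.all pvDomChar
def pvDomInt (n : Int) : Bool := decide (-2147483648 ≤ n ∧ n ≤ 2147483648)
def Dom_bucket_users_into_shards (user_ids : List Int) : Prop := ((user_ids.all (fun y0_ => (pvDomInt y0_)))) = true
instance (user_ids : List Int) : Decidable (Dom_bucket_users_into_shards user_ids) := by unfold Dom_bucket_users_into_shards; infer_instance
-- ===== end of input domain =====

-- B replaces A's one-pass dict build with 'distinct shard keys first, then one filter per shard' (same result; alternative decomposition, not faster).

-- ===== PORT A =====
def NUM_LOGICAL_SHARDS : Int := 16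

def logical_shard_for_user (user_id : Int) : Int :=
  PySem.Int.mod user_id NUM_LOGICAL_SHARDS

def bucket_users_into_shards (user_ids : List Int) : List (Int × List Int) :=
  (user_ids.foldl (fun d id =>
      let shard := logical_shard_for_user id
      let d := if d.contains shard then d else d.insert shard ([] : List Int)
      d.modify shard [] (fun l => l ++ [id]))
    PySem.Dict.empty).items

-- ===== PORT B =====
def bucket_users_into_shards_alt (user_ids : List Int) : List (Int × List Int) :=
  (PySem.List.dedup (user_ids.map (fun i => logical_shard_for_user i))).map
    (fun s => (s, user_ids.filter (fun i => logical_shard_for_user i == s)))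

-- ===== PRECONDITION & SPEC =====
def Spec_bucket_users_into_shards (user_ids : List Int) (out : List (Int × List Int)) : Prop := out = bucket_users_into_shards_alt user_ids
instance (user_ids : List Int) (out : List (Int × List Int)) : Decidable (Spec_bucket_users_into_shards user_ids out) := by unfold Spec_bucket_users_into_shards; infer_instance

-- ===== CLAIM (what is proved, stated in full; the proofs are below) =====
def Claim_equal_bucket_users_into_shards : Prop := ∀ (user_ids : List Int), Dom_bucket_users_into_shards user_ids → Spec_bucket_users_into_shards user_ids (bucket_users_into_shards user_ids)

-- ===== LEMMAS AND PROOFS =====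

-- A's "insert [] if absent, then append" step is one Dict.modify.
theorem step_eq_modify (d : PySem.Dict Int (List Int)) (id : Int) :
    (let shard := logical_shard_for_user id
     let d' := if d.contains shard then d else d.insert shard ([] : List Int)
     d'.modify shard [] (fun l => l ++ [id]))
      = d.modify (logical_shard_for_user id) [] (fun l => l ++ [id]) := by
  by_cases h : d.contains (logical_shard_for_user id) = true
  · simp [h]
  · simp only [Bool.not_eq_true] at h
    simp [h, PySem.Dict.modify, PySem.Dict.insert_insert_self, PySem.Dict.getD_insert_self,
          PySem.Dict.getD_of_not_contains (d := d) (k := logical_shard_for_user id)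
            (d0 := ([] : List Int)) h]

theorem bucket_as_modify_fold (user_ids : List Int) :
    bucket_users_into_shards user_ids
      = (user_ids.foldl
          (fun d id => d.modify (logical_shard_for_user id) [] (fun l => l ++ [id]))
          PySem.Dict.empty).items := by
  unfold bucket_users_into_shards
  congr 1
  congr 1
  funext d id
  exact step_eq_modify d id

-- ===== VERDICT (by name: the statement is the Claim_ definition above) =====
theorem bucket_users_into_shards_spec : Claim_equal_bucket_users_into_shards := by
  intro user_ids _
  unfold Spec_bucket_users_into_shards bucket_users_into_shards_alt
  rw [bucket_as_modify_fold]
  set d := user_ids.foldl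
      (fun d id => d.modify (logical_shard_for_user id) [] (fun l => l ++ [id]))
      PySem.Dict.empty with hd
  have hpair : d = (user_ids.map (fun id => (logical_shard_for_user id, id))).foldl
      (fun d p => d.modify p.1 [] (fun l => l ++ [p.2])) PySem.Dict.empty := by
    rw [List.foldl_map]
  have hkeys : d.keys = PySem.Set.ofList (user_ids.map (fun i => logical_shard_for_user i)) := by
    rw [hd, PySem.Dict.keys_foldl_modify_key user_ids (fun id => logical_shard_for_user id)
          ([] : List Int) (fun _ id => fun l => l ++ [id]) PySem.Dict.empty]
    simp [PySem.Set.update_nil_left]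
  have hnd : d.keys.Nodup := by
    rw [hkeys]; exact PySem.Set.nodup_ofList _
  rw [PySem.Dict.items_eq_map_keys d hnd ([] : List Int), hkeys]
  simp only [PySem.List.dedup_eq_ofList]
  apply List.map_congr_left
  intro s _
  rw [hpair, PySem.Dict.getD_foldl_modify_append]
  simp [List.filter_map, Function.comp_def]
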